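-- pv_equiv track=rewrite | github.com/mongodb/mongo | buildscripts/resmokelib/run/list_tags.py | split_into_tags
-- ===== SOURCE A (Python) =====
-- def split_into_tags(tags_block):
--     """Split tag block into lines representing each tag."""
--     tags_block_lines = tags_block.split("\n")[1:]
--     splitted_tags_block = []
--     i = 0
--     for line in tags_block_lines:
--         if len(splitted_tags_block) <= i:
--             splitted_tags_block.append([])
--         line = line.strip()
--         splitted_tags_block[i].append(line)
--         if line.startswith("-"):
--             i += 1
--     return splitted_tags_block
-- ===== SOURCE B (Python) =====
-- def split_into_tags(tags_block):
--     """Split tag block into lines representing each tag."""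
--     lines = [line.strip() for line in tags_block.split("\n")[1:]]
--     groups = []
--     while lines:
--         cut = next((i + 1 for i, line in enumerate(lines) if line.startswith("-")), len(lines))
--         groups.append(lines[:cut])
--         lines = lines[cut:]
--     return groups
-- ===== Notes on version B (the rewrite author's own statement) =====
-- stated objective: alternative
-- what changed: A fills buckets line by line with a mutable bucket index; B strips all lines up front and repeatedly slices off whole groups at the next dash-terminated line (find-cut-and-slice loop).
import Mathlib
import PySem

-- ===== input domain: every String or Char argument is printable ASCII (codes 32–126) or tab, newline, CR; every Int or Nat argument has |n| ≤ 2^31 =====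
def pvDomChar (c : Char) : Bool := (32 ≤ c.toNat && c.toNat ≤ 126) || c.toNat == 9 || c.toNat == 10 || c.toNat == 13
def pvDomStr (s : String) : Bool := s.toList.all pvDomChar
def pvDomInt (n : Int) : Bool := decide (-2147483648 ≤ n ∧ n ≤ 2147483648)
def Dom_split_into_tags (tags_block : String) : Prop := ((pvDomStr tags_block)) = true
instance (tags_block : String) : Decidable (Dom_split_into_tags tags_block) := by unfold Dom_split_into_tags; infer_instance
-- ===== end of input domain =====

-- B groups the (pre-stripped) lines by slicing off whole groups at each dash-terminated line,
-- instead of A's line-by-line bucket filling with a mutable bucket index; same cost, different decomposition.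

-- line.startswith("-"), shared by both ports
def pvDash (l : String) : Bool := PySem.Str.startswith l "-"

-- ===== PORT A =====
def pvAStep (st : List (List String) × Nat) (line : String) : List (List String) × Nat :=
  let sb := if st.1.length ≤ st.2 then st.1 ++ [[]] else st.1
  let line := PySem.Str.strip line
  let sb := sb.set st.2 (sb.getD st.2 [] ++ [line])
  if pvDash line then (sb, st.2 + 1) else (sb, st.2)

def split_into_tags (tags_block : String) : List (List String) :=
  ((((PySem.Str.split? tags_block "\n").getD []).drop 1).foldl pvAStep ([], 0)).1

-- ===== PORT B =====
-- cut = index just past the first '-'-starting line, or all the lines if none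
def pvAltCut (ls : List String) : Nat :=
  match ls.findIdx? pvDash with
  | some i => i + 1
  | none => ls.length

theorem pvAltCut_pos (l : String) (ls : List String) : 1 ≤ pvAltCut (l :: ls) := by
  unfold pvAltCut
  cases h : (l :: ls).findIdx? pvDash <;> simp

def pvAltLoop : List String → List (List String)
  | [] => []
  | l :: ls =>
    (l :: ls).take (pvAltCut (l :: ls)) :: pvAltLoop ((l :: ls).drop (pvAltCut (l :: ls)))
termination_by ls => ls.length
decreasing_by
  have h := pvAltCut_pos l ls
  simp [List.length_drop]; omega

def split_into_tags_alt (tags_block : String) : List (List String) :=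
  pvAltLoop ((((PySem.Str.split? tags_block "\n").getD []).drop 1).map PySem.Str.strip)

-- ===== PRECONDITION & SPEC =====
def Spec_split_into_tags (tags_block : String) (out : List (List String)) : Prop := out = split_into_tags_alt tags_block
instance (tags_block : String) (out : List (List String)) : Decidable (Spec_split_into_tags tags_block out) := by unfold Spec_split_into_tags; infer_instance

-- ===== CLAIM (what is proved, stated in full; the proofs are below) =====
def Claim_equal_split_into_tags : Prop := ∀ (tags_block : String), Dom_split_into_tags tags_block → Spec_split_into_tags tags_block (split_into_tags tags_block)

-- ===== LEMMAS AND PROOFS =====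

-- common reference: group pre-stripped lines, `cur` the open (unterminated) group
def pvGroups : List String → List String → List (List String)
  | cur, [] => if cur = [] then [] else [cur]
  | cur, s :: ls =>
    if pvDash s then (cur ++ [s]) :: pvGroups [] ls else pvGroups (cur ++ [s]) ls

theorem pv_fold_eq_groups (lines : List String) :
    ∀ (sb0 : List (List String)) (cur : List String),
      (lines.foldl pvAStep (sb0 ++ (if cur = [] then [] else [cur]), sb0.length)).1
        = sb0 ++ pvGroups cur (lines.map PySem.Str.strip) := by
  induction lines with
  | nil =>
    intro sb0 cur
    by_cases h : cur = [] <;> simp [pvGroups, h]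
  | cons l ls ih =>
    intro sb0 cur
    by_cases hc : cur = []
    · subst hc
      simp only [if_true, List.append_nil, List.foldl_cons, List.map_cons]
      have hstep : pvAStep (sb0, sb0.length) l =
          if pvDash (PySem.Str.strip l)
          then (sb0 ++ [[PySem.Str.strip l]], sb0.length + 1)
          else (sb0 ++ [[PySem.Str.strip l]], sb0.length) := by
        simp [pvAStep]
      rw [hstep]
      by_cases hd : pvDash (PySem.Str.strip l)
      · rw [if_pos hd]
        have := ih (sb0 ++ [[PySem.Str.strip l]]) []
        simp only [if_true, List.append_nil, List.length_append,
          List.length_cons, List.length_nil] at this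
        rw [this]
        simp [pvGroups, hd]
      · rw [if_neg hd]
        have := ih sb0 [PySem.Str.strip l]
        simp only [if_neg (by simp : ¬([PySem.Str.strip l] = []))] at this
        rw [this]
        simp [pvGroups, hd]
    · simp only [if_neg hc, List.foldl_cons, List.map_cons]
      have hlen : (sb0 ++ [cur]).length = sb0.length + 1 := by simp
      have hstep : pvAStep (sb0 ++ [cur], sb0.length) l =
          if pvDash (PySem.Str.strip l)
          then (sb0 ++ [cur ++ [PySem.Str.strip l]], sb0.length + 1)
          else (sb0 ++ [cur ++ [PySem.Str.strip l]], sb0.length) := by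
        simp [pvAStep, hlen]
      rw [hstep]
      by_cases hd : pvDash (PySem.Str.strip l)
      · rw [if_pos hd]
        have := ih (sb0 ++ [cur ++ [PySem.Str.strip l]]) []
        simp only [if_true, List.append_nil, List.length_append,
          List.length_cons, List.length_nil] at this
        rw [this]
        simp [pvGroups, hd]
      · rw [if_neg hd]
        have := ih sb0 (cur ++ [PySem.Str.strip l])
        simp only [if_neg (by simp : ¬(cur ++ [PySem.Str.strip l] = []))] at this
        rw [this]
        simp [pvGroups, hd]

theorem pv_groups_eq_altLoop (ls : List String) :
    ∀ (cur : List String),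
      pvGroups cur ls =
        match pvAltLoop ls with
        | [] => if cur = [] then [] else [cur]
        | g :: gs => (cur ++ g) :: gs := by
  induction ls with
  | nil => intro cur; simp [pvGroups, pvAltLoop]
  | cons s ls ih =>
    intro cur
    by_cases hd : pvDash s
    · have hcut : pvAltCut (s :: ls) = 1 := by
        simp [pvAltCut, List.findIdx?_cons, hd]
      have hloop : pvAltLoop (s :: ls) = [s] :: pvAltLoop ls := by
        rw [pvAltLoop, hcut]; simp
      have hih := ih []
      rw [hloop]
      simp only [pvGroups, if_pos hd, hih]
      cases h : pvAltLoop ls <;> simp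
    · have hfi : (s :: ls).findIdx? pvDash
          = (ls.findIdx? pvDash).map (· + 1) := by
        simp [List.findIdx?_cons, hd]
      have hih := ih (cur ++ [s])
      simp only [pvGroups, if_neg hd, hih]
      cases hf : ls.findIdx? pvDash with
      | none =>
        have hcut : pvAltCut (s :: ls) = (s :: ls).length := by
          simp [pvAltCut, hfi, hf]
        have hloop : pvAltLoop (s :: ls) = [s :: ls] := by
          rw [pvAltLoop, hcut]; simp [pvAltLoop]
        rw [hloop]
        cases ls with
        | nil => simp [pvAltLoop]
        | cons a t =>
          have hcut2 : pvAltCut (a :: t) = (a :: t).length := by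
            simp [pvAltCut, hf]
          have hloop2 : pvAltLoop (a :: t) = [a :: t] := by
            rw [pvAltLoop, hcut2]; simp [pvAltLoop]
          rw [hloop2]
          simp
      | some i =>
        have hcut : pvAltCut (s :: ls) = i + 2 := by
          simp [pvAltCut, hfi, hf]
        have hloop : pvAltLoop (s :: ls)
            = (s :: ls.take (i + 1)) :: pvAltLoop (ls.drop (i + 1)) := by
          rw [pvAltLoop, hcut]; simp [List.take_succ_cons, List.drop_succ_cons]
        cases ls with
        | nil => simp at hf
        | cons a t =>
          have hcut2 : pvAltCut (a :: t) = i + 1 := by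
            simp [pvAltCut, hf]
          have hloop2 : pvAltLoop (a :: t)
              = ((a :: t).take (i + 1)) :: pvAltLoop ((a :: t).drop (i + 1)) := by
            rw [pvAltLoop, hcut2]
          rw [hloop, hloop2]
          simp

-- ===== VERDICT (by name: the statement is the Claim_ definition above) =====
theorem split_into_tags_spec : Claim_equal_split_into_tags := by
  intro s _
  show split_into_tags s = split_into_tags_alt s
  unfold split_into_tags split_into_tags_alt
  have h1 := pv_fold_eq_groups (((PySem.Str.split? s "\n").getD []).drop 1) [] []
  simp only [if_true, List.append_nil, List.nil_append,
    List.length_nil] at h1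
  rw [h1]
  have h2 := pv_groups_eq_altLoop ((((PySem.Str.split? s "\n").getD []).drop 1).map PySem.Str.strip) []
  rw [h2]
  cases pvAltLoop ((((PySem.Str.split? s "\n").getD []).drop 1).map PySem.Str.strip) <;> simp
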